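-- pv_equiv track=rewrite | github.com/DUMBALINYOLO/web_brain_scrapper | traversing.py | is_childless
-- ===== SOURCE A (Python) =====
-- def deduplicate_and_clean_root_nodes(nodes):
--     '''
--         In scrapped texts that exist after clicking the div->thought ->active there
--         the root_or_second_generation_nodes are always avaliable. Hence a need to dump them
--         we also need to convert the list in a set to eliminate duplicates there are any
--         We are interested in dumping the root node (The Knowledge Web and its children)
--     '''
--     deduplicated_nodes = set(nodes)
--     filtered= []
--     for node in deduplicated_nodes:
--         #
--         if is_root_or_second_generation_node(node) != True:
--             filtered.append(node)
--     return filtered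
--
-- def is_root_or_second_generation_node(text):
--     '''
--         The slugs/ids that are dynamically altered when you click on the node
--         are hidden except in the source code and my assumption would be its
--         concealed in a react-router-dom like way of navigation. Therefore we are
--         left with no choice except for extracting all the text that lies in
--         the divs with class thought ->
--          <div
--             class="thought"
--             style="font-size: 15px;
--             top: 219px;
--             left: 217px;
--             color: rgb(255, 0, 0);
--             background-color: rgba(0, 0, 0, 0.5);
--             font-family: sans-serif;
--             padding: 2px;
--             opacity: 1;
--             z-index: 100;"
--         >
--
--         We extract the words and store them in a list and then filter out the root node
--         and first generation nodes and we allow the user to choose from the filtered list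
--         which word would he/she want to follow in their scrapping adventure. The chosen
--         word then is extracted and dynamically put into
--
--             => driver.find_elements_by_xpath("//*[contains(text(), text)]")
--                 and then attempt to click the div ... I may have taken the hard path here
--             => well there seem to be a better way and it has to do with the searchBox and ul.stationaryClickMenu li
--             => we need to manipulate these guys in order to start playing around and scrapping
--         This is so because the url links are changed when this div component is
--         clicked and then the tree node of the path is exposed when the div state
--         is altered into active. It seems only one div with class thought can be
--         active in the entire page, per an individual user query
--
--
--     '''
--     if text in [
--             'The Knowledge Web',
--             'Gateways',
--             'Mystery Tours',
--             'Declaration of Independence',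
--             '',
--         ]:
--         return True
--     else:
--         return False
--
-- def is_childless(nodes, text):
--     '''
--         When a node has no more childress its pointless to continue navigating
--         You are only limited to the scrape only functionality and exit
--     '''
--     cleaned_nodes = deduplicate_and_clean_root_nodes(nodes)
--
--     children = [
--             node for node \
--             in cleaned_nodes
--             if node != text
--         ]
--
--
--     if len(children) < 1:
--         return True
--     else:
--         return False
-- ===== SOURCE B (Python) =====
-- BLACKLIST = frozenset([
--     'The Knowledge Web',
--     'Gateways',
--     'Mystery Tours',
--     'Declaration of Independence',
--     '',
-- ])
--
-- def is_childless(nodes, text):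
--     return all(node in BLACKLIST or node == text for node in nodes)
-- ===== Notes on version B (the rewrite author's own statement) =====
-- stated objective: simpler
-- what changed: Inlines both helpers into a single short-circuit all() over the input list with a frozenset blacklist, removing the dedup pass and the two intermediate filtered lists entirely.
import Mathlib
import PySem

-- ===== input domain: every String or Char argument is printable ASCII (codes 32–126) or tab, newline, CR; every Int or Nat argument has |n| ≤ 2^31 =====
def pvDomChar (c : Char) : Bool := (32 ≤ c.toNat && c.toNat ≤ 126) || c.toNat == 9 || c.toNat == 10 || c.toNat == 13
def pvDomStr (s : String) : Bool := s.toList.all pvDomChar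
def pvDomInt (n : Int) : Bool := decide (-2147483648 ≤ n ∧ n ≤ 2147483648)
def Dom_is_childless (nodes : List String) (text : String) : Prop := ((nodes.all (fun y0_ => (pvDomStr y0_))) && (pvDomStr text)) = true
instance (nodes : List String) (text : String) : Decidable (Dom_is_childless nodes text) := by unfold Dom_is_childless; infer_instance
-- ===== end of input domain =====

-- ===== PORT A =====
-- B changes: inlines both helpers into one short-circuit all() over the list with a set-constant blacklist (objective: simpler).
def pvRootList : List String :=
  ["The Knowledge Web", "Gateways", "Mystery Tours", "Declaration of Independence", ""]

def is_root_or_second_generation_node (text : String) : Bool :=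
  if pvRootList.contains text then true else false

def deduplicate_and_clean_root_nodes (nodes : List String) : List String :=
  let deduplicated_nodes : PySem.Set String := PySem.Set.ofList nodes
  -- iteration over the set: the caller only uses the length, which is order-independent
  deduplicated_nodes.foldl
    (fun filtered node =>
      if (is_root_or_second_generation_node node != true) then filtered ++ [node] else filtered) []

def is_childless (nodes : List String) (text : String) : Bool :=
  let cleaned_nodes := deduplicate_and_clean_root_nodes nodes
  let children := cleaned_nodes.filter (fun node => node != text)
  if children.length < 1 then true else false

-- ===== PORT B =====
def pvBlacklist : List String :=
  ["The Knowledge Web", "Gateways", "Mystery Tours", "Declaration of Independence", ""]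

def is_childless_alt (nodes : List String) (text : String) : Bool :=
  nodes.all (fun node => pvBlacklist.contains node || node == text)

-- ===== PRECONDITION & SPEC =====
def Spec_is_childless (nodes : List String) (text : String) (out : Bool) : Prop := out = is_childless_alt nodes text
instance (nodes : List String) (text : String) (out : Bool) : Decidable (Spec_is_childless nodes text out) := by unfold Spec_is_childless; infer_instance

-- ===== CLAIM (what is proved, stated in full; the proofs are below) =====
def Claim_equal_is_childless : Prop := ∀ (nodes : List String) (text : String), Dom_is_childless nodes text → Spec_is_childless nodes text (is_childless nodes text)

-- ===== LEMMAS AND PROOFS =====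
theorem root_eq_contains (a : String) :
    is_root_or_second_generation_node a = pvRootList.contains a := by
  simp [is_root_or_second_generation_node]
theorem childless_eq (nodes : List String) (text : String) :
    is_childless nodes text = is_childless_alt nodes text := by
  simp only [is_childless, is_childless_alt, deduplicate_and_clean_root_nodes,
    PySem.List.foldl_append_if_eq_filter, List.nil_append, List.filter_filter]
  have hpred : ∀ a : String,
      (a != text && (is_root_or_second_generation_node a != true)) =
        !(pvBlacklist.contains a || a == text) := by
    intro a
    rw [root_eq_contains]
    show _ = !(pvRootList.contains a || a == text)
    cases h1 : pvRootList.contains a <;> cases h2 : a == text <;> simp_all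
  simp only [hpred]
  split_ifs with hc
  · symm
    rw [Nat.lt_one_iff, List.length_eq_zero_iff, List.filter_eq_nil_iff] at hc
    rw [List.all_eq_true]
    intro a ha
    have := hc a ((PySem.Set.mem_ofList nodes a).2 ha)
    simp only [Bool.or_eq_true, List.contains_eq_mem, decide_eq_true_eq, beq_iff_eq]
    exact or_iff_not_imp_left.2 (by simpa using this)
  · symm
    rw [Bool.eq_false_iff]
    intro hall
    apply hc
    rw [Nat.lt_one_iff, List.length_eq_zero_iff, List.filter_eq_nil_iff]
    intro a ha
    have := (List.all_eq_true.1 hall) a ((PySem.Set.mem_ofList nodes a).1 ha)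
    have h2 : a ∈ pvBlacklist ∨ a = text := by simpa using this
    rcases h2 with h | h <;> simp [h]

-- ===== VERDICT (by name: the statement is the Claim_ definition above) =====
theorem is_childless_spec : Claim_equal_is_childless := by
  intro nodes text _
  unfold Spec_is_childless
  exact childless_eq nodes text
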